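-- pv_equiv track=rewrite | github.com/baikaishui888/DocuGen-AI | test_validator_final.py | validate_document_format
-- ===== SOURCE A (Python) =====
-- from typing import Dict, List
--
-- def validate_document_format(content: str) -> List[Dict]:
--     """
--     验证文档格式是否符合规范
--     :param content: 文档内容
--     :return: 问题列表
--     """
--     issues = []
--
--     # 检查标题层级
--     current_level = 0
--     for line in content.split('\n'):
--         if line.strip().startswith('#'):
--             # 计算#的数量
--             level = len(line) - len(line.lstrip('#'))
--
--             # 标题层级不应该跳跃，例如从# 直接到###
--             if level > current_level + 1 and current_level > 0:
--                 issues.append({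
--                     "type": "heading_level_jump",
--                     "line": line.strip(),
--                     "message": f"标题层级跳跃: 从{current_level}级到{level}级"
--                 })
--
--             current_level = level
--
--     # 检查表格格式 - 改进检测逻辑
--     lines = content.split('\n')
--     table_state = "none"  # 标记表格状态：none, header, separator, data
--
--     for i, line in enumerate(lines):
--         line = line.strip()
--
--         # 检测表格头部
--         if line.startswith('|') and line.endswith('|') and ' | ' in line and table_state == "none":
--             table_state = "header"
--
--             # 检查下一行是否为分隔符
--             if i + 1 < len(lines):
--                 next_line = lines[i + 1].strip()
--                 if next_line.startswith('|') and next_line.endswith('|') and '-' in next_line: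
--                     table_state = "separator"
--                 else:
--                     issues.append({
--                         "type": "table_format_error",
--                         "line": line,
--                         "message": "表格头部后缺少分隔行"
--                     })
--         # 表格数据行不需要检查
--         elif line.startswith('|') and line.endswith('|') and table_state == "separator":
--             table_state = "data"
--         # 空行或非表格行重置表格状态
--         elif not line or not line.startswith('|'):
--             table_state = "none"
--
--     # 检查代码块格式
--     in_code_block = False
--     has_language = False
--
--     for line in content.split('\n'):
--         line = line.strip()
--         if line.startswith('```'):
--             if not in_code_block:
--                 in_code_block = True
--                 # 检查是否指定了语言
--                 has_language = len(line) > 3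
--             else:
--                 # 代码块结束
--                 in_code_block = False
--                 if not has_language:
--                     issues.append({
--                         "type": "code_block_no_language",
--                         "message": "代码块未指定编程语言"
--                     })
--                 has_language = False
--
--     # 检查未关闭的代码块
--     if in_code_block:
--         issues.append({
--             "type": "unclosed_code_block",
--             "message": "代码块未关闭"
--         })
--
--     return issues
-- ===== SOURCE B (Python) =====
-- def validate_document_format(content):
--     """Single-pass re-implementation: one loop maintains all three state machines
--     (heading level, table state with look-ahead, code fences) and three per-category
--     accumulators, concatenated at the end in A's output order."""
--     lines = content.split('\n')
--     heading_issues, table_issues, code_issues = [], [], []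
--     current_level = 0
--     table_state = "none"
--     in_code_block = False
--     has_language = False
--     for raw, nxt in zip(lines, lines[1:] + [None]):
--         line = raw.strip()
--         # headings (level computed on the raw line)
--         if line.startswith('#'):
--             level = len(raw) - len(raw.lstrip('#'))
--             if level > current_level + 1 and current_level > 0:
--                 heading_issues.append({
--                     "type": "heading_level_jump",
--                     "line": line,
--                     "message": f"标题层级跳跃: 从{current_level}级到{level}级"
--                 })
--             current_level = level
--         # tables (look-ahead on the next line, if any)
--         if line.startswith('|') and line.endswith('|') and ' | ' in line and table_state == "none":
--             table_state = "header"
--             if nxt is not None: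
--                 next_line = nxt.strip()
--                 if next_line.startswith('|') and next_line.endswith('|') and '-' in next_line:
--                     table_state = "separator"
--                 else:
--                     table_issues.append({
--                         "type": "table_format_error",
--                         "line": line,
--                         "message": "表格头部后缺少分隔行"
--                     })
--         elif line.startswith('|') and line.endswith('|') and table_state == "separator":
--             table_state = "data"
--         elif not line or not line.startswith('|'):
--             table_state = "none"
--         # code fences
--         if line.startswith('```'):
--             if not in_code_block:
--                 in_code_block = True
--                 has_language = len(line) > 3
--             else:
--                 in_code_block = False
--                 if not has_language:
--                     code_issues.append({
--                         "type": "code_block_no_language",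
--                         "message": "代码块未指定编程语言"
--                     })
--                 has_language = False
--     if in_code_block:
--         code_issues.append({
--             "type": "unclosed_code_block",
--             "message": "代码块未关闭"
--         })
--     return heading_issues + table_issues + code_issues
-- ===== Notes on version B (the rewrite author's own statement) =====
-- stated objective: alternative
-- what changed: A makes three separate passes over the lines (headings, tables with index look-ahead, code fences), chaining one shared issues list; B builds the line list once and runs a single loop maintaining all three state machines together with a zip-based look-ahead, collecting issues into three per-category lists concatenated at the end.
import Mathlib
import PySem

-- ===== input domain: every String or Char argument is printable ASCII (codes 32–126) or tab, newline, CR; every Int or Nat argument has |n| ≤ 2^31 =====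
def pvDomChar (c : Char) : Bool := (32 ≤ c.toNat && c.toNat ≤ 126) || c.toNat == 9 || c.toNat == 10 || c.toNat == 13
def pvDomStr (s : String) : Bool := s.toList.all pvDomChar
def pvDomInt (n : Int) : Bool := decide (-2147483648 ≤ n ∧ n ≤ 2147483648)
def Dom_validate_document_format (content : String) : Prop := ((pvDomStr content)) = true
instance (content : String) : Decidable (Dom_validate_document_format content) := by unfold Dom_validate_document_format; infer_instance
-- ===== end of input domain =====

-- B re-implements A's three separate passes as ONE pass with three per-category accumulators
-- (same return value; objective: alternative decomposition, single traversal).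

-- ===== PORT A =====
-- shared issue literals (both Pythons build exactly these dicts, ported as assoc lists)
def headingIssue (lineStripped : String) (cl lv : Int) : List (String × String) :=
  [("type", "heading_level_jump"), ("line", lineStripped),
   ("message", "标题层级跳跃: 从" ++ PySem.Int.toStr cl ++ "级到" ++ PySem.Int.toStr lv ++ "级")]
def tableIssue (line : String) : List (String × String) :=
  [("type", "table_format_error"), ("line", line), ("message", "表格头部后缺少分隔行")]
def codeIssue : List (String × String) :=
  [("type", "code_block_no_language"), ("message", "代码块未指定编程语言")]
def unclosedIssue : List (String × String) :=
  [("type", "unclosed_code_block"), ("message", "代码块未关闭")]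
-- content.split('\n') (sep ≠ "", exact)
def splitNL (content : String) : List String :=
  (PySem.Chars.splitOn content.toList "\n".toList).map String.ofList

-- A, pass 1: heading-level check (level computed on the RAW line; lstrip('#') = dropWhile (= '#'), exact)
def aHeadStep (st : List (List (String × String)) × Int) (line : String) :
    List (List (String × String)) × Int :=
  if PySem.Str.startswith (PySem.Str.strip line) "#" then
    let level := PySem.Str.len line - (line.toList.dropWhile (· == '#')).length
    ((if level > st.2 + 1 ∧ st.2 > 0 then st.1 ++ [headingIssue (PySem.Str.strip line) st.2 level] else st.1),
     level)
  else st

-- A, pass 2: table check; `for i, line in enumerate(lines)` with look-ahead lines[i+1]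
def aTableStep (lines : List String) (i : Nat) (raw : String)
    (st : List (List (String × String)) × String) : List (List (String × String)) × String :=
  let line := PySem.Str.strip raw
  if PySem.Str.startswith line "|" && PySem.Str.endswith line "|" &&
      PySem.Str.isIn " | " line && (st.2 == "none") then
    if i + 1 < lines.length then
      -- lines[i+1] is in range by the guard
      let next_line := PySem.Str.strip (PySem.List.pyGetD lines ((i : Int) + 1) "")
      if PySem.Str.startswith next_line "|" && PySem.Str.endswith next_line "|" &&
          PySem.Str.isIn "-" next_line then
        (st.1, "separator")
      else (st.1 ++ [tableIssue line], "header")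
    else (st.1, "header")
  else if PySem.Str.startswith line "|" && PySem.Str.endswith line "|" && (st.2 == "separator") then
    (st.1, "data")
  else if line == "" || !PySem.Str.startswith line "|" then
    (st.1, "none")
  else st

def aTableLoop (lines : List String) (i : Nat) (todo : List String)
    (st : List (List (String × String)) × String) : List (List (String × String)) × String :=
  match todo with
  | [] => st
  | raw :: rest => aTableLoop lines (i + 1) rest (aTableStep lines i raw st)

-- A, pass 3: code-fence check
def aCodeStep (st : List (List (String × String)) × Bool × Bool) (raw : String) :
    List (List (String × String)) × Bool × Bool :=
  let line := PySem.Str.strip raw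
  if PySem.Str.startswith line "```" then
    if !st.2.1 then (st.1, true, decide (PySem.Str.len line > 3))
    else ((if !st.2.2 then st.1 ++ [codeIssue] else st.1), false, false)
  else st

def validate_document_format (content : String) : List (List (String × String)) :=
  let p1 := (splitNL content).foldl aHeadStep ([], 0)
  let lines := splitNL content
  let p2 := aTableLoop lines 0 lines (p1.1, "none")
  let p3 := (splitNL content).foldl aCodeStep (p2.1, false, false)
  if p3.2.1 then p3.1 ++ [unclosedIssue] else p3.1

-- ===== PORT B =====
-- single-pass state: three per-category accumulators plus the three state machines
structure BSt where
  h : List (List (String × String))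
  t : List (List (String × String))
  c : List (List (String × String))
  cl : Int
  ts : String
  icb : Bool
  hl : Bool

-- loop body of B: the three checks in sequence on one line; each block reads/writes only its
-- own variables, so it is computed as its own component update; nxt = the zip look-ahead
def bStep (raw : String) (nxt : Option String) (st : BSt) : BSt :=
  let line := PySem.Str.strip raw
  -- headings (level computed on the raw line)
  let hp :=
    if PySem.Str.startswith line "#" then
      let level := PySem.Str.len raw - (raw.toList.dropWhile (· == '#')).length
      ((if level > st.cl + 1 ∧ st.cl > 0 then st.h ++ [headingIssue line st.cl level] else st.h),
       level)
    else (st.h, st.cl)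
  -- tables (look-ahead on the next line, if any)
  let tp :=
    if PySem.Str.startswith line "|" && PySem.Str.endswith line "|" &&
        PySem.Str.isIn " | " line && (st.ts == "none") then
      match nxt with
      | some n =>
        let next_line := PySem.Str.strip n
        if PySem.Str.startswith next_line "|" && PySem.Str.endswith next_line "|" &&
            PySem.Str.isIn "-" next_line then
          (st.t, "separator")
        else (st.t ++ [tableIssue line], "header")
      | none => (st.t, "header")
    else if PySem.Str.startswith line "|" && PySem.Str.endswith line "|" && (st.ts == "separator") then
      (st.t, "data")
    else if line == "" || !PySem.Str.startswith line "|" then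
      (st.t, "none")
    else (st.t, st.ts)
  -- code fences
  let cp :=
    if PySem.Str.startswith line "```" then
      if !st.icb then (st.c, true, decide (PySem.Str.len line > 3))
      else ((if !st.hl then st.c ++ [codeIssue] else st.c), false, false)
    else (st.c, st.icb, st.hl)
  ⟨hp.1, tp.1, cp.1, hp.2, tp.2, cp.2.1, cp.2.2⟩

-- `for raw, nxt in zip(lines, lines[1:] + [None])`: nxt is the head of the remaining list
def bLoop : List String → BSt → BSt
  | [], st => st
  | raw :: rest, st => bLoop rest (bStep raw rest.head? st)

def validate_document_format_alt (content : String) : List (List (String × String)) :=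
  let lines := splitNL content
  let st := bLoop lines ⟨[], [], [], 0, "none", false, false⟩
  st.h ++ st.t ++ (if st.icb then st.c ++ [unclosedIssue] else st.c)

-- ===== PRECONDITION & SPEC =====
def Spec_validate_document_format (content : String) (out : List (List (String × String))) : Prop := out = validate_document_format_alt content
instance (content : String) (out : List (List (String × String))) : Decidable (Spec_validate_document_format content out) := by unfold Spec_validate_document_format; infer_instance

-- ===== CLAIM (what is proved, stated in full; the proofs are below) =====
def Claim_equal_validate_document_format : Prop := ∀ (content : String), Dom_validate_document_format content → Spec_validate_document_format content (validate_document_format content)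

-- ===== LEMMAS AND PROOFS =====

-- B's table part on a pair, with the look-ahead as an Option (proof-side bridge)
def tStep (raw : String) (nxt : Option String)
    (st : List (List (String × String)) × String) : List (List (String × String)) × String :=
  let line := PySem.Str.strip raw
  if PySem.Str.startswith line "|" && PySem.Str.endswith line "|" &&
      PySem.Str.isIn " | " line && (st.2 == "none") then
    match nxt with
    | some n =>
      let next_line := PySem.Str.strip n
      if PySem.Str.startswith next_line "|" && PySem.Str.endswith next_line "|" &&
          PySem.Str.isIn "-" next_line then
        (st.1, "separator")
      else (st.1 ++ [tableIssue line], "header")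
    | none => (st.1, "header")
  else if PySem.Str.startswith line "|" && PySem.Str.endswith line "|" && (st.2 == "separator") then
    (st.1, "data")
  else if line == "" || !PySem.Str.startswith line "|" then
    (st.1, "none")
  else st

lemma aTableStep_eq_tStep (full : List String) (i : Nat) (raw : String) (rest : List String)
    (st : List (List (String × String)) × String) (hdrop : full.drop i = raw :: rest) :
    aTableStep full i raw st = tStep raw rest.head? st := by
  have hget : full[i + 1]? = rest.head? := by
    have : (full.drop i)[1]? = full[i + 1]? := by
      rw [List.getElem?_drop]
    rw [← this, hdrop]
    cases rest <;> simp
  have hgd : PySem.List.pyGetD full ((i : Int) + 1) "" = (full[i + 1]?).getD "" := by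
    have : ((i : Int) + 1) = ((i + 1 : Nat) : Int) := by push_cast; ring
    rw [this, PySem.List.pyGetD_natCast]
    simp [List.getD]
  cases rest with
  | nil =>
    have hlen : ¬ (i + 1 < full.length) := by
      intro hc
      rw [List.getElem?_eq_getElem hc] at hget
      simp at hget
    simp only [aTableStep, tStep, hlen, if_false, List.head?_nil]
  | cons n r =>
    have hlen : i + 1 < full.length := by
      by_contra hc
      rw [List.getElem?_eq_none (by omega)] at hget
      simp at hget
    have hn : PySem.List.pyGetD full ((i : Int) + 1) "" = n := by
      rw [hgd, hget]; rfl
    simp only [aTableStep, tStep, hlen, if_true, hn, List.head?_cons]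

-- one-line decomposition: B's combined step is the three A-shaped steps side by side
lemma bStep_decompose (raw : String) (nxt : Option String) (st : BSt) :
    bStep raw nxt st =
      ⟨(aHeadStep (st.h, st.cl) raw).1,
       (tStep raw nxt (st.t, st.ts)).1,
       (aCodeStep (st.c, st.icb, st.hl) raw).1,
       (aHeadStep (st.h, st.cl) raw).2,
       (tStep raw nxt (st.t, st.ts)).2,
       (aCodeStep (st.c, st.icb, st.hl) raw).2.1,
       (aCodeStep (st.c, st.icb, st.hl) raw).2.2⟩ := by
  rfl

-- issues are only appended: each pass's accumulator factors out
lemma aHeadStep_append (is : List (List (String × String))) (cl : Int) (l : String) :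
    aHeadStep (is, cl) l = (is ++ (aHeadStep ([], cl) l).1, (aHeadStep ([], cl) l).2) := by
  simp only [aHeadStep]; split_ifs <;> simp

lemma foldl_aHeadStep_append :
    ∀ (lines : List String) (is : List (List (String × String))) (cl : Int),
      List.foldl aHeadStep (is, cl) lines =
        (is ++ (List.foldl aHeadStep ([], cl) lines).1, (List.foldl aHeadStep ([], cl) lines).2)
  | [], is, cl => by simp
  | l :: ls, is, cl => by
    rw [List.foldl_cons, List.foldl_cons, aHeadStep_append,
        foldl_aHeadStep_append ls (is ++ (aHeadStep ([], cl) l).1),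
        foldl_aHeadStep_append ls (aHeadStep ([], cl) l).1]
    simp

lemma aTableStep_append (full : List String) (i : Nat) (raw : String)
    (is : List (List (String × String))) (ts : String) :
    aTableStep full i raw (is, ts) =
      (is ++ (aTableStep full i raw ([], ts)).1, (aTableStep full i raw ([], ts)).2) := by
  simp only [aTableStep]; split_ifs <;> simp

lemma aTableLoop_append :
    ∀ (todo : List String) (full : List String) (i : Nat)
      (is : List (List (String × String))) (ts : String),
      aTableLoop full i todo (is, ts) =
        (is ++ (aTableLoop full i todo ([], ts)).1, (aTableLoop full i todo ([], ts)).2)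
  | [], _, _, _, _ => by simp [aTableLoop]
  | raw :: rest, full, i, is, ts => by
    rw [aTableLoop, aTableLoop, aTableStep_append,
        aTableLoop_append rest full (i + 1) (is ++ (aTableStep full i raw ([], ts)).1),
        aTableLoop_append rest full (i + 1) (aTableStep full i raw ([], ts)).1]
    simp

lemma aCodeStep_append (is : List (List (String × String))) (icb hl : Bool) (l : String) :
    aCodeStep (is, icb, hl) l =
      (is ++ (aCodeStep ([], icb, hl) l).1, (aCodeStep ([], icb, hl) l).2) := by
  simp only [aCodeStep]; split_ifs <;> simp

lemma foldl_aCodeStep_append :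
    ∀ (lines : List String) (is : List (List (String × String))) (icb hl : Bool),
      List.foldl aCodeStep (is, icb, hl) lines =
        (is ++ (List.foldl aCodeStep ([], icb, hl) lines).1, (List.foldl aCodeStep ([], icb, hl) lines).2)
  | [], is, icb, hl => by simp
  | l :: ls, is, icb, hl => by
    rw [List.foldl_cons, List.foldl_cons, aCodeStep_append,
        foldl_aCodeStep_append ls (is ++ (aCodeStep ([], icb, hl) l).1),
        foldl_aCodeStep_append ls (aCodeStep ([], icb, hl) l).1]
    simp

-- the combined loop computes exactly the three passes, componentwise
lemma bLoop_eq :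
    ∀ (todo full : List String) (i : Nat) (st : BSt), full.drop i = todo →
      bLoop todo st =
        ⟨(List.foldl aHeadStep (st.h, st.cl) todo).1,
         (aTableLoop full i todo (st.t, st.ts)).1,
         (List.foldl aCodeStep (st.c, st.icb, st.hl) todo).1,
         (List.foldl aHeadStep (st.h, st.cl) todo).2,
         (aTableLoop full i todo (st.t, st.ts)).2,
         (List.foldl aCodeStep (st.c, st.icb, st.hl) todo).2.1,
         (List.foldl aCodeStep (st.c, st.icb, st.hl) todo).2.2⟩
  | [], full, i, st, _ => by simp [bLoop, aTableLoop]
  | raw :: rest, full, i, st, hdrop => by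
    have hdrop' : full.drop (i + 1) = rest := by
      have : full.drop (i + 1) = (full.drop i).tail := by
        rw [← List.drop_drop]; simp
      rw [this, hdrop]; rfl
    rw [bLoop, bStep_decompose, bLoop_eq rest full (i + 1) _ hdrop']
    rw [aTableLoop, ← aTableStep_eq_tStep full i raw rest _ hdrop]
    simp [List.foldl_cons]

-- ===== VERDICT (by name: the statement is the Claim_ definition above) =====
theorem validate_document_format_spec : Claim_equal_validate_document_format := by
  intro content _
  unfold Spec_validate_document_format validate_document_format validate_document_format_alt
  dsimp only
  rw [bLoop_eq (splitNL content) (splitNL content) 0 _ (by simp)]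
  dsimp only
  rw [aTableLoop_append, foldl_aCodeStep_append]
  simp [List.append_assoc]
  split_ifs <;> simp
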